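-- pv_equiv track=rewrite | github.com/brunovlucena/homelab | flux/clusters/homelab/infrastructure/agent-sre/deployments/sift/analyzers.py | _is_error_pattern
-- ===== SOURCE A (Python) =====
-- def _is_error_pattern(line: str) -> bool:
--     """Check if log line contains error indicators"""
--     error_keywords = [
--         "error",
--         "exception",
--         "failed",
--         "failure",
--         "fatal",
--         "panic",
--         "critical",
--         "emergency",
--         "alert",
--         "denied",
--         "timeout",
--         "refused",
--         "unreachable",
--         "unavailable",
--     ]
--
--     line_lower = line.lower()
--     return any(keyword in line_lower for keyword in error_keywords)
-- ===== SOURCE B (Python) =====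
-- def _matches_at(line: str, i: int, kw: str) -> bool:
--     """Does kw match case-insensitively at position i of line?"""
--     if len(line) < i + len(kw):
--         return False
--     for j in range(len(kw)):
--         if line[i + j].lower() != kw[j]:
--             return False
--     return True
--
--
-- def _is_error_pattern(line: str) -> bool:
--     """Check if log line contains error indicators"""
--     error_keywords = [
--         "error",
--         "exception",
--         "failed",
--         "failure",
--         "fatal",
--         "panic",
--         "critical",
--         "emergency",
--         "alert",
--         "denied",
--         "timeout",
--         "refused",
--         "unreachable",
--         "unavailable",
--     ]
--     for i in range(len(line)):
--         if any(_matches_at(line, i, kw) for kw in error_keywords):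
--             return True
--     return False
-- ===== Notes on version B (the rewrite author's own statement) =====
-- stated objective: alternative
-- what changed: A lowercases the whole line once and runs an independent substring search for each of the 14 keywords; B makes one sweep over the suffixes of the line, lowercasing characters on the fly and testing each keyword as a prefix of the current suffix, with no lowered copy and no substring-search primitive.
import Mathlib
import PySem

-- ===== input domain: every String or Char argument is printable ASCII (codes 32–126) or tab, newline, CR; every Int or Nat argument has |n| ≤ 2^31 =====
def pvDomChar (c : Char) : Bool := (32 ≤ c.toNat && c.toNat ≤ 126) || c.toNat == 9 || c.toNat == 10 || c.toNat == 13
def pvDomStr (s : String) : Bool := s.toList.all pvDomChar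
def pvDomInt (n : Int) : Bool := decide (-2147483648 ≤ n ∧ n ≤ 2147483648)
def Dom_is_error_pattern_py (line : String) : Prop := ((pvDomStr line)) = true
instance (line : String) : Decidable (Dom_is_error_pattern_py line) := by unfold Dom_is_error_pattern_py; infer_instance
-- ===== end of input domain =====

-- B replaces A's per-keyword substring scans over a fully lowercased copy by a single
-- position-by-position sweep that lowercases characters on the fly and tests each keyword as a
-- prefix at the current position; objective: alternative (same task, different traversal), no speed claim.


-- ===== PORT A =====
def pvKeywordsA : List String :=
  ["error", "exception", "failed", "failure", "fatal", "panic", "critical",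
   "emergency", "alert", "denied", "timeout", "refused", "unreachable", "unavailable"]

def is_error_pattern_py (line : String) : Bool :=
  let line_lower := PySem.Str.lower line
  pvKeywordsA.any (fun keyword => PySem.Str.isIn keyword line_lower)

-- ===== PORT B =====
def pvKeywordsB : List String :=
  ["error", "exception", "failed", "failure", "fatal", "panic", "critical",
   "emergency", "alert", "denied", "timeout", "refused", "unreachable", "unavailable"]

-- port of _matches_at (strings handled as their character lists; line[i+j] is in range
-- whenever the guard passed, so pyGetD's default is never used)
def pvMatchesAt (line : List Char) (i : Nat) (kw : List Char) : Bool :=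
  if line.length < i + kw.length then false
  else (List.range kw.length).all (fun j =>
    PySem.Chars.lower [PySem.List.pyGetD line ((i + j : Nat) : Int) ' ']
      == [PySem.List.pyGetD kw ((j : Nat) : Int) ' '])

-- port of the for-loop over positions i in range(len(line)) with early return
def is_error_pattern_py_alt (line : String) : Bool :=
  (List.range line.toList.length).any (fun i =>
    pvKeywordsB.any (fun kw => pvMatchesAt line.toList i kw.toList))

-- ===== PRECONDITION & SPEC =====
def Spec_is_error_pattern_py (line : String) (out : Bool) : Prop := out = is_error_pattern_py_alt line
instance (line : String) (out : Bool) : Decidable (Spec_is_error_pattern_py line out) := by unfold Spec_is_error_pattern_py; infer_instance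

-- ===== CLAIM (what is proved, stated in full; the proofs are below) =====
def Claim_equal_is_error_pattern_py : Prop := ∀ (line : String), Dom_is_error_pattern_py line → Spec_is_error_pattern_py line (is_error_pattern_py line)

-- ===== LEMMAS AND PROOFS =====

-- matching a keyword at position i is: the keyword is a prefix of the lowered i-th suffix
theorem pvMatchesAt_iff (cs : List Char) (i : Nat) (kw : List Char) (hkw : kw ≠ []) :
    pvMatchesAt cs i kw = true ↔ kw <+: PySem.Chars.lower (cs.drop i) := by
  have hk1 : 0 < kw.length := List.length_pos_iff.mpr hkw
  have hlen : (PySem.Chars.lower (cs.drop i)).length = cs.length - i := by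
    simp [PySem.Chars.lower]
  unfold pvMatchesAt
  split_ifs with h
  · simp only [false_iff]
    intro hp
    have := hp.length_le
    omega
  · rw [List.all_eq_true, List.prefix_iff_getElem]
    constructor
    · intro hall
      refine ⟨by omega, ?_⟩
      intro j hj
      have hb : i + j < cs.length := by omega
      have := hall j (List.mem_range.mpr hj)
      simp only [PySem.List.pyGetD_natCast, beq_iff_eq, PySem.Chars.lower, List.map_cons,
        List.map_nil, List.singleton_inj, List.getD_eq_getElem _ _ hb,
        List.getD_eq_getElem _ _ hj] at this
      simp [PySem.Chars.lower, List.getElem_drop, this]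
    · rintro ⟨hle, hel⟩ j hj
      rw [List.mem_range] at hj
      have hb : i + j < cs.length := by omega
      have := hel j hj
      simp only [PySem.Chars.lower, List.getElem_map, List.getElem_drop] at this
      rw [PySem.List.pyGetD_natCast, PySem.List.pyGetD_natCast]
      simp only [PySem.Chars.lower, List.map_cons, List.map_nil, beq_iff_eq, List.singleton_inj,
        List.getD_eq_getElem _ _ hb, List.getD_eq_getElem _ _ hj]
      exact this.symm

-- no keyword is empty
theorem pvKeywordsB_ne_nil : ∀ kw ∈ pvKeywordsB, kw.toList ≠ [] := by decide

-- the position loop finds a keyword iff one is a prefix of some lowered suffix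
theorem pvScan_iff (cs : List Char) :
    ((List.range cs.length).any (fun i => pvKeywordsB.any (fun kw => pvMatchesAt cs i kw.toList))) = true
      ↔ ∃ kw ∈ pvKeywordsB, ∃ j, kw.toList <+: PySem.Chars.lower (cs.drop j) := by
  simp only [List.any_eq_true, List.mem_range]
  constructor
  · rintro ⟨i, hi, kw, hkw, hm⟩
    exact ⟨kw, hkw, i, (pvMatchesAt_iff cs i kw.toList (pvKeywordsB_ne_nil kw hkw)).mp hm⟩
  · rintro ⟨kw, hkw, j, hp⟩
    have hne := pvKeywordsB_ne_nil kw hkw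
    have hj : j < cs.length := by
      by_contra hge
      have : cs.drop j = [] := List.drop_eq_nil_of_le (by omega)
      rw [this] at hp
      simp only [PySem.Chars.lower, List.map_nil, List.prefix_nil] at hp
      exact hne hp
    exact ⟨j, hj, kw, hkw, (pvMatchesAt_iff cs j kw.toList hne).mpr hp⟩

-- the two ports agree on every string (no domain assumption needed)
theorem pv_main (line : String) : is_error_pattern_py line = is_error_pattern_py_alt line := by
  simp only [is_error_pattern_py, is_error_pattern_py_alt]
  rw [Bool.eq_iff_iff, pvScan_iff]
  simp only [List.any_eq_true]
  constructor
  · rintro ⟨kw, hkw, hin⟩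
    rw [PySem.Str.isIn_iff_infix] at hin
    simp only [PySem.Str.toList_lower] at hin
    rw [← PySem.Chars.isIn_iff_infix, ← PySem.Chars.exists_prefix_drop_iff_isIn] at hin
    obtain ⟨j, hj⟩ := hin
    refine ⟨kw, hkw, j, ?_⟩
    simpa [PySem.Chars.lower, List.map_drop] using hj
  · rintro ⟨kw, hkw, j, hm⟩
    refine ⟨kw, hkw, ?_⟩
    rw [PySem.Str.isIn_iff_infix]
    simp only [PySem.Str.toList_lower]
    rw [← PySem.Chars.isIn_iff_infix, ← PySem.Chars.exists_prefix_drop_iff_isIn]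
    exact ⟨j, by simpa [PySem.Chars.lower, List.map_drop] using hm⟩

-- ===== VERDICT (by name: the statement is the Claim_ definition above) =====
theorem is_error_pattern_py_spec : Claim_equal_is_error_pattern_py := by
  intro line _
  unfold Spec_is_error_pattern_py
  exact pv_main line
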